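-- pv_equiv track=rewrite | github.com/gustavopinto/sumula | app/pipeline/verify_author.py | _names_conflict
-- ===== SOURCE A (Python) =====
-- def _normalize_name(name: str) -> str:
--     """Lowercase + strip for fuzzy comparison."""
--     return " ".join(name.lower().split())
--
-- def _names_conflict(names: list[str]) -> bool:
--     """Return True if the identified names are clearly from different people."""
--     normalized = [_normalize_name(n) for n in names]
--     unique = set(normalized)
--     if len(unique) <= 1:
--         return False
--
--     # Allow partial matches: "gustavo pinto" vs "gustavo henrique lima pinto"
--     for a in unique:
--         for b in unique:
--             if a == b:
--                 continue
--             parts_a = set(a.split())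
--             parts_b = set(b.split())
--             # If they share at least 2 name tokens, consider them the same person
--             if len(parts_a & parts_b) >= 2:
--                 return False
--
--     return True
-- ===== SOURCE B (Python) =====
-- def _normalize_name(name: str) -> str:
--     """Lowercase + strip for fuzzy comparison."""
--     return " ".join(name.lower().split())
--
-- def _names_conflict(names: list[str]) -> bool:
--     """Return True if the identified names are clearly from different people."""
--     normalized = {_normalize_name(n) for n in names}
--     if len(normalized) <= 1:
--         return False
--     # Index every unordered pair of tokens; a pair seen in two different
--     # names means those names share >= 2 tokens, i.e. no clear conflict.
--     seen = {}
--     for name in normalized: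
--         toks = list(dict.fromkeys(name.split()))
--         for i, t1 in enumerate(toks):
--             for t2 in toks[i + 1:]:
--                 key = (t1, t2) if t1 < t2 else (t2, t1)
--                 other = seen.get(key)
--                 if other is not None and other != name:
--                     return False
--                 seen[key] = name
--     return True
-- ===== Notes on version B (the rewrite author's own statement) =====
-- stated objective: faster
-- what changed: Replaces A's all-pairs comparison of unique names (intersecting token sets for every ordered pair) with a single pass that indexes every unordered 2-token combination of each name in a dict; a key collision from a different name detects the shared >= 2 tokens directly.
import Mathlib
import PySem

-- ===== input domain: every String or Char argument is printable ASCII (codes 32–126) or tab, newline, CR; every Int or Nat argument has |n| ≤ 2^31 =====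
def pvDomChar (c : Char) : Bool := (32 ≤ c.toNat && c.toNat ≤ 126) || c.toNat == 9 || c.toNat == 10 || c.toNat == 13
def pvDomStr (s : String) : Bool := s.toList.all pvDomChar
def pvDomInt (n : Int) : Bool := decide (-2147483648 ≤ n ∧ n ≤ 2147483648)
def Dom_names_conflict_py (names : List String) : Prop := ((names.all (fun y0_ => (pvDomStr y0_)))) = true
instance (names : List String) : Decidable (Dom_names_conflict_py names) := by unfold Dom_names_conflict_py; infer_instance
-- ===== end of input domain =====

-- B replaces A's all-pairs O(U²·T) name comparison by a dict indexing every unordered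
-- 2-token combination per unique name, so a cross-name key collision detects the shared
-- ≥2 tokens in one pass over the names (objective: faster, asymptotic).

-- ===== PORT A =====
-- " ".join(name.lower().split())
def pvNormalize (name : String) : String :=
  PySem.Str.join " " (PySem.Str.split₀ (PySem.Str.lower name))

def names_conflict_py (names : List String) : Bool :=
  let normalized := names.map pvNormalize
  let unique : PySem.Set String := PySem.Set.ofList normalized
  if PySem.Set.len unique ≤ 1 then false
  else
    -- for a in unique: for b in unique: if a == b: continue; if len(parts_a & parts_b) >= 2: return False
    if unique.any (fun a => unique.any (fun b =>
        (!(a == b)) && decide ((2:Int) ≤ PySem.Set.len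
          (PySem.Set.inter (PySem.Set.ofList (PySem.Str.split₀ a))
                           (PySem.Set.ofList (PySem.Str.split₀ b))))))
    then false
    else true

-- ===== PORT B =====
-- key = (t1, t2) if t1 < t2 else (t2, t1)
def pvCanon (t1 t2 : String) : String × String :=
  if t1 < t2 then (t1, t2) else (t2, t1)

-- for i, t1 in enumerate(toks): for t2 in toks[i+1:]: yield key
def pvPairs : List String → List (String × String)
  | [] => []
  | t :: ts => ts.map (fun u => pvCanon t u) ++ pvPairs ts

-- inner double loop over one name's token pairs: None = conflict found (return False)
def pvScanPairs (name : String) :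
    List (String × String) → PySem.Dict (String × String) String →
    Option (PySem.Dict (String × String) String)
  | [], seen => some seen
  | k :: ks, seen =>
    match seen.get? k with
    | some other =>
        if other ≠ name then none
        else pvScanPairs name ks (seen.insert k name)
    | none => pvScanPairs name ks (seen.insert k name)

-- for name in normalized: …
def pvScanNames : List String → PySem.Dict (String × String) String → Bool
  | [], _ => true
  | n :: ns, seen =>
    match pvScanPairs n (pvPairs (PySem.List.dedup (PySem.Str.split₀ n))) seen with
    | none => false
    | some seen' => pvScanNames ns seen'

def names_conflict_py_alt (names : List String) : Bool :=
  let normalized : PySem.Set String := PySem.Set.ofList (names.map pvNormalize)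
  if PySem.Set.len normalized ≤ 1 then false
  else pvScanNames normalized PySem.Dict.empty

-- ===== PRECONDITION & SPEC =====
def Spec_names_conflict_py (names : List String) (out : Bool) : Prop := out = names_conflict_py_alt names
instance (names : List String) (out : Bool) : Decidable (Spec_names_conflict_py names out) := by unfold Spec_names_conflict_py; infer_instance

-- ===== CLAIM (what is proved, stated in full; the proofs are below) =====
def Claim_equal_names_conflict_py : Prop := ∀ (names : List String), Dom_names_conflict_py names → Spec_names_conflict_py names (names_conflict_py names)

-- ===== LEMMAS AND PROOFS =====

-- the unordered token pairs of a normalized name, and the "share ≥ 2 tokens" relation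
def pvPairsOf (a : String) : List (String × String) :=
  pvPairs (PySem.List.dedup (PySem.Str.split₀ a))

def pvShare (a b : String) : Prop :=
  ∃ p, p ∈ pvPairsOf a ∧ p ∈ pvPairsOf b

theorem pvCanon_comm (x y : String) (h : x ≠ y) : pvCanon x y = pvCanon y x := by
  rcases lt_or_gt_of_ne h with hlt | hgt
  · simp [pvCanon, hlt, not_lt_of_gt hlt]
  · simp [pvCanon, hgt, not_lt_of_gt hgt]

theorem pvCanon_eq {x y x' y' : String} (h : pvCanon x y = pvCanon x' y') :
    (x = x' ∧ y = y') ∨ (x = y' ∧ y = x') := by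
  unfold pvCanon at h
  split_ifs at h <;> injection h with h3 h4 <;> tauto

theorem mem_pvPairs {l : List String} {x y : String}
    (hx : x ∈ l) (hy : y ∈ l) (hne : x ≠ y) : pvCanon x y ∈ pvPairs l := by
  induction l with
  | nil => cases hx
  | cons t ts ih =>
    simp only [pvPairs, List.mem_append, List.mem_map]
    rcases List.mem_cons.1 hx with rfl | hx'
    · refine Or.inl ⟨y, ?_, rfl⟩
      rcases List.mem_cons.1 hy with rfl | h
      · exact absurd rfl hne
      · exact h
    · rcases List.mem_cons.1 hy with rfl | hy'
      · exact Or.inl ⟨x, hx', (pvCanon_comm x y hne).symm⟩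
      · exact Or.inr (ih hx' hy')

theorem of_mem_pvPairs {l : List String} {p : String × String}
    (hnd : l.Nodup) (hp : p ∈ pvPairs l) :
    ∃ x y, x ∈ l ∧ y ∈ l ∧ x ≠ y ∧ p = pvCanon x y := by
  induction l with
  | nil => cases hp
  | cons t ts ih =>
    rcases List.mem_append.1 hp with h | h
    · obtain ⟨u, hu, rfl⟩ := List.mem_map.1 h
      exact ⟨t, u, List.mem_cons_self .., List.mem_cons_of_mem _ hu,
        fun h => (List.nodup_cons.1 hnd).1 (h ▸ hu), rfl⟩
    · obtain ⟨x, y, hx, hy, hne, rfl⟩ := ih (List.nodup_cons.1 hnd).2 h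
      exact ⟨x, y, List.mem_cons_of_mem _ hx, List.mem_cons_of_mem _ hy, hne, rfl⟩

theorem two_le_length_iff {l : List String} (hnd : l.Nodup) :
    (2 ≤ l.length ↔ ∃ x ∈ l, ∃ y ∈ l, x ≠ y) := by
  constructor
  · intro h
    rcases l with _ | ⟨x, _ | ⟨y, t⟩⟩
    · simp at h
    · simp at h
    · exact ⟨x, List.mem_cons_self .., y, List.mem_cons_of_mem _ (List.mem_cons_self ..),
        fun he => (List.nodup_cons.1 hnd).1 (he ▸ List.mem_cons_self ..)⟩
  · rintro ⟨x, hx, y, hy, hne⟩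
    rcases l with _ | ⟨a, _ | ⟨b, t⟩⟩
    · cases hx
    · exact absurd ((List.mem_singleton.1 hx).trans (List.mem_singleton.1 hy).symm) hne
    · simp only [List.length_cons]; omega

theorem share_iff_inter (a b : String) :
    ((2:Int) ≤ PySem.Set.len
      (PySem.Set.inter (PySem.Set.ofList (PySem.Str.split₀ a))
                       (PySem.Set.ofList (PySem.Str.split₀ b)))) ↔ pvShare a b := by
  have hnd := PySem.Set.nodup_inter (PySem.Set.ofList (PySem.Str.split₀ a))
      (PySem.Set.ofList (PySem.Str.split₀ b)) (PySem.Set.nodup_ofList _)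
  have hlen : ((2:Int) ≤ PySem.Set.len
      (PySem.Set.inter (PySem.Set.ofList (PySem.Str.split₀ a))
                       (PySem.Set.ofList (PySem.Str.split₀ b)))) ↔
      2 ≤ (PySem.Set.inter (PySem.Set.ofList (PySem.Str.split₀ a))
                       (PySem.Set.ofList (PySem.Str.split₀ b))).length := by
    simp [PySem.Set.len]
  rw [hlen, two_le_length_iff hnd]
  constructor
  · rintro ⟨x, hx, y, hy, hne⟩
    rw [PySem.Set.mem_inter] at hx hy
    refine ⟨pvCanon x y, ?_, ?_⟩ <;>
    · apply mem_pvPairs _ _ hne <;>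
        simp only [PySem.List.mem_dedup] <;>
        first
          | exact (PySem.Set.mem_ofList _ _).1 hx.1
          | exact (PySem.Set.mem_ofList _ _).1 hy.1
          | exact (PySem.Set.mem_ofList _ _).1 hx.2
          | exact (PySem.Set.mem_ofList _ _).1 hy.2
  · rintro ⟨p, hpa, hpb⟩
    obtain ⟨x, y, hxa, hya, hne, rfl⟩ := of_mem_pvPairs (PySem.List.nodup_dedup _) hpa
    obtain ⟨x', y', hxb, hyb, hne', heq⟩ := of_mem_pvPairs (PySem.List.nodup_dedup _) hpb
    have hxb' : x ∈ PySem.List.dedup (PySem.Str.split₀ b) ∧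
        y ∈ PySem.List.dedup (PySem.Str.split₀ b) := by
      rcases pvCanon_eq heq with ⟨rfl, rfl⟩ | ⟨rfl, rfl⟩
      · exact ⟨hxb, hyb⟩
      · exact ⟨hyb, hxb⟩
    rw [PySem.List.mem_dedup] at hxa hya
    obtain ⟨hxb2, hyb2⟩ := hxb'
    rw [PySem.List.mem_dedup] at hxb2 hyb2
    exact ⟨x, by rw [PySem.Set.mem_inter, PySem.Set.mem_ofList, PySem.Set.mem_ofList]; exact ⟨hxa, hxb2⟩,
           y, by rw [PySem.Set.mem_inter, PySem.Set.mem_ofList, PySem.Set.mem_ofList]; exact ⟨hya, hyb2⟩, hne⟩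

theorem pvScanPairs_eq_none {name : String} {ks : List (String × String)}
    {seen : PySem.Dict (String × String) String} :
    pvScanPairs name ks seen = none ↔
      ∃ k ∈ ks, ∃ v, seen.get? k = some v ∧ v ≠ name := by
  induction ks generalizing seen with
  | nil => simp [pvScanPairs]
  | cons k ks ih =>
    have hstep : pvScanPairs name (k :: ks) seen =
        match seen.get? k with
        | some other =>
            if other ≠ name then none else pvScanPairs name ks (seen.insert k name)
        | none => pvScanPairs name ks (seen.insert k name) := rfl
    cases hg : seen.get? k with
    | some v =>
      have hstep2 : pvScanPairs name (k :: ks) seen =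
          if v ≠ name then none else pvScanPairs name ks (seen.insert k name) := by
        rw [hstep, hg]
      rw [hstep2]
      by_cases hv : v ≠ name
      · rw [if_pos hv]
        exact ⟨fun _ => ⟨k, List.mem_cons_self .., v, hg, hv⟩, fun _ => rfl⟩
      · simp only [ne_eq, not_not] at hv; subst hv
        rw [if_neg (by simp), ih]
        constructor
        · rintro ⟨k', hk', v', hvg, hvne⟩
          rw [PySem.Dict.get?_insert] at hvg
          split_ifs at hvg with he
          · exact absurd (Option.some.inj hvg).symm hvne
          · exact ⟨k', List.mem_cons_of_mem _ hk', v', hvg, hvne⟩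
        · rintro ⟨k', hk', v', hvg, hvne⟩
          rcases List.mem_cons.1 hk' with rfl | hk''
          · exact absurd (Option.some.inj (hg ▸ hvg)).symm hvne
          · refine ⟨k', hk'', v', ?_, hvne⟩
            rw [PySem.Dict.get?_insert]
            split_ifs with he
            · exact absurd (Option.some.inj ((he ▸ hvg).symm.trans hg)) hvne
            · exact hvg
    | none =>
      have hstep2 : pvScanPairs name (k :: ks) seen =
          pvScanPairs name ks (seen.insert k name) := by
        rw [hstep, hg]
      rw [hstep2, ih]
      constructor
      · rintro ⟨k', hk', v', hvg, hvne⟩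
        rw [PySem.Dict.get?_insert] at hvg
        split_ifs at hvg with he
        · exact absurd (Option.some.inj hvg).symm hvne
        · exact ⟨k', List.mem_cons_of_mem _ hk', v', hvg, hvne⟩
      · rintro ⟨k', hk', v', hvg, hvne⟩
        rcases List.mem_cons.1 hk' with rfl | hk''
        · rw [hg] at hvg; cases hvg
        · refine ⟨k', hk'', v', ?_, hvne⟩
          rw [PySem.Dict.get?_insert]
          split_ifs with he
          · rw [he, hg] at hvg; cases hvg
          · exact hvg

theorem pvScanPairs_eq_some {name : String} {ks : List (String × String)}
    {seen d : PySem.Dict (String × String) String}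
    (h : pvScanPairs name ks seen = some d) :
    ∀ k, d.get? k = if k ∈ ks then some name else seen.get? k := by
  induction ks generalizing seen with
  | nil =>
    intro k
    injection h with h'
    subst h'
    simp
  | cons k' ks ih =>
    intro k
    have hstep : pvScanPairs name (k' :: ks) seen =
        match seen.get? k' with
        | some other =>
            if other ≠ name then none else pvScanPairs name ks (seen.insert k' name)
        | none => pvScanPairs name ks (seen.insert k' name) := rfl
    have hrec : pvScanPairs name ks (seen.insert k' name) = some d := by
      cases hg : seen.get? k' with
      | some v =>
        have hstep2 : pvScanPairs name (k' :: ks) seen =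
            if v ≠ name then none else pvScanPairs name ks (seen.insert k' name) := by
          rw [hstep, hg]
        rw [hstep2] at h
        by_cases hv : v ≠ name
        · rw [if_pos hv] at h; cases h
        · rwa [if_neg hv] at h
      | none =>
        have hstep2 : pvScanPairs name (k' :: ks) seen =
            pvScanPairs name ks (seen.insert k' name) := by
          rw [hstep, hg]
        rwa [hstep2] at h
    have := ih hrec
    rw [this k, PySem.Dict.get?_insert]
    by_cases hk : k ∈ ks
    · simp [hk]
    · by_cases he : k = k' <;> simp [hk, he]

-- invariant characterization of the outer loop
theorem pvScanNames_eq_true {ns : List String} {seen : PySem.Dict (String × String) String} :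
    pvScanNames ns seen = true ↔
      (∀ a ∈ ns, ∀ k ∈ pvPairsOf a, ∀ v, seen.get? k = some v → v = a) ∧
      ns.Pairwise (fun a b => a ≠ b → ¬ pvShare a b) := by
  induction ns generalizing seen with
  | nil => simp [pvScanNames]
  | cons a ns ih =>
    have hstep : pvScanNames (a :: ns) seen =
        match pvScanPairs a (pvPairs (PySem.List.dedup (PySem.Str.split₀ a))) seen with
        | none => false
        | some seen' => pvScanNames ns seen' := rfl
    cases hs : pvScanPairs a (pvPairs (PySem.List.dedup (PySem.Str.split₀ a))) seen with
    | none =>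
      have hstep2 : pvScanNames (a :: ns) seen = false := by rw [hstep, hs]
      rw [hstep2]
      obtain ⟨k, hk, v, hv, hne⟩ := pvScanPairs_eq_none.1 hs
      constructor
      · intro h; cases h
      · rintro ⟨hcross, _⟩
        exact absurd (hcross a (List.mem_cons_self ..) k hk v hv) hne
    | some d =>
      have hstep2 : pvScanNames (a :: ns) seen = pvScanNames ns d := by rw [hstep, hs]
      rw [hstep2]
      have hcross_a : ∀ k ∈ pvPairsOf a, ∀ v, seen.get? k = some v → v = a := by
        intro k hk v hv
        by_contra hne
        have hnone : pvScanPairs a (pvPairs (PySem.List.dedup (PySem.Str.split₀ a))) seen = none :=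
          pvScanPairs_eq_none.2 ⟨k, hk, v, hv, hne⟩
        rw [hs] at hnone
        cases hnone
      have hd := pvScanPairs_eq_some hs
      rw [ih]
      constructor
      · rintro ⟨hcrossd, hpw⟩
        refine ⟨?_, List.pairwise_cons.2 ⟨?_, hpw⟩⟩
        · intro b hb k hk v hv
          rcases List.mem_cons.1 hb with rfl | hb'
          · exact hcross_a k hk v hv
          · have hdba := hcrossd b hb' k hk
            rw [hd k] at hdba
            by_cases hka : k ∈ pvPairs (PySem.List.dedup (PySem.Str.split₀ a))
            · rw [if_pos hka] at hdba
              have hab : a = b := hdba a rfl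
              have hka' : k ∈ pvPairsOf a := hka
              exact (hcross_a k hka' v hv).trans hab
            · rw [if_neg hka] at hdba
              exact hdba v hv
        · intro b hb hab hshare
          obtain ⟨p, hpa, hpb⟩ := hshare
          have hpa' : p ∈ pvPairs (PySem.List.dedup (PySem.Str.split₀ a)) := hpa
          have hdb := hcrossd b hb p hpb a
          rw [hd p, if_pos hpa'] at hdb
          exact hab (hdb rfl)
      · rintro ⟨hcross, hpw⟩
        obtain ⟨hRa, hpw'⟩ := List.pairwise_cons.1 hpw
        refine ⟨?_, hpw'⟩
        intro b hb k hk v hv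
        rw [hd k] at hv
        by_cases hka : k ∈ pvPairs (PySem.List.dedup (PySem.Str.split₀ a))
        · rw [if_pos hka] at hv
          have hva : v = a := (Option.some.inj hv).symm
          by_cases hab : a = b
          · exact hva.trans hab
          · exact absurd ⟨k, hka, hk⟩ (hRa b hb hab)
        · rw [if_neg hka] at hv
          exact hcross b (List.mem_cons_of_mem _ hb) k hk v hv

theorem pvShare_symm {a b : String} (h : pvShare a b) : pvShare b a := by
  obtain ⟨p, h1, h2⟩ := h; exact ⟨p, h2, h1⟩

-- ===== VERDICT (by name: the statement is the Claim_ definition above) =====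
theorem names_conflict_py_spec : Claim_equal_names_conflict_py := by
  intro names _
  unfold Spec_names_conflict_py names_conflict_py names_conflict_py_alt
  simp only []
  by_cases hle : PySem.Set.len (PySem.Set.ofList (names.map pvNormalize)) ≤ 1
  · rw [if_pos hle, if_pos hle]
  · rw [if_neg hle, if_neg hle]
    have hB : pvScanNames (PySem.Set.ofList (names.map pvNormalize)) PySem.Dict.empty = true ↔
        (PySem.Set.ofList (names.map pvNormalize)).Pairwise
          (fun a b => a ≠ b → ¬ pvShare a b) := by
      rw [pvScanNames_eq_true]
      simp [PySem.Dict.get?_empty]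
    have hA : ((PySem.Set.ofList (names.map pvNormalize)).any (fun a =>
        (PySem.Set.ofList (names.map pvNormalize)).any (fun b =>
        (!(a == b)) && decide ((2:Int) ≤ PySem.Set.len
          (PySem.Set.inter (PySem.Set.ofList (PySem.Str.split₀ a))
                           (PySem.Set.ofList (PySem.Str.split₀ b))))))) = true ↔
        ∃ a ∈ PySem.Set.ofList (names.map pvNormalize),
          ∃ b ∈ PySem.Set.ofList (names.map pvNormalize), a ≠ b ∧ pvShare a b := by
      simp only [List.any_eq_true, Bool.and_eq_true, Bool.not_eq_true', beq_eq_false_iff_ne,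
        decide_eq_true_eq]
      constructor
      · rintro ⟨a, ha, b, hb, hne, hlen⟩
        exact ⟨a, ha, b, hb, hne, (share_iff_inter a b).1 hlen⟩
      · rintro ⟨a, ha, b, hb, hne, hsh⟩
        exact ⟨a, ha, b, hb, hne, (share_iff_inter a b).2 hsh⟩
    have hiff : (PySem.Set.ofList (names.map pvNormalize)).Pairwise
          (fun a b => a ≠ b → ¬ pvShare a b) ↔
        ¬ ∃ a ∈ PySem.Set.ofList (names.map pvNormalize),
            ∃ b ∈ PySem.Set.ofList (names.map pvNormalize), a ≠ b ∧ pvShare a b := by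
      constructor
      · rintro hpw ⟨a, ha, b, hb, hne, hsh⟩
        have hsym : Symmetric (fun a b : String => a ≠ b → ¬ pvShare a b) := by
          intro x y h hne' hsh'
          exact h (Ne.symm hne') (pvShare_symm hsh')
        exact (hpw.forall hsym ha hb hne) hne hsh
      · intro hno
        apply List.pairwise_of_forall_mem_list
        intro a ha b hb hne hsh
        exact hno ⟨a, ha, b, hb, hne, hsh⟩
    cases hAny : ((PySem.Set.ofList (names.map pvNormalize)).any (fun a =>
        (PySem.Set.ofList (names.map pvNormalize)).any (fun b =>
        (!(a == b)) && decide ((2:Int) ≤ PySem.Set.len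
          (PySem.Set.inter (PySem.Set.ofList (PySem.Str.split₀ a))
                           (PySem.Set.ofList (PySem.Str.split₀ b))))))) with
    | false =>
      rw [if_neg Bool.false_ne_true]
      symm
      rw [hB, hiff]
      intro hex
      have := hA.2 hex
      rw [hAny] at this
      cases this
    | true =>
      rw [if_pos rfl]
      symm
      rw [← Bool.not_eq_true, hB, hiff]
      simp only [not_not]
      exact hA.1 hAny
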